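-- pv_equiv track=rewrite | github.com/Jianshu-She/Tree-Rollout | mcts_inference/utils.py | _has_completed_boxed
-- ===== SOURCE A (Python) =====
-- def _has_completed_boxed(text: str) -> bool:
--     """Check if text contains a completed \\boxed{...} (with matching braces)."""
--     start = 0
--     while True:
--         pos = text.find("\\boxed{", start)
--         if pos == -1:
--             return False
--         brace = 1
--         i = pos + 7
--         while i < len(text) and brace > 0:
--             if text[i] == "{":
--                 brace += 1
--             elif text[i] == "}":
--                 brace -= 1
--             i += 1
--         if brace == 0:
--             return True
--         start = pos + 1
-- ===== SOURCE B (Python) =====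
-- def _has_completed_boxed(text: str) -> bool:
--     """Check if text contains a completed \\boxed{...} (with matching braces)."""
--     stack = []
--     last6 = ""
--     for ch in text:
--         if ch == "{":
--             stack.append(last6 == "\\boxed")
--         elif ch == "}":
--             if stack and stack.pop():
--                 return True
--         last6 = (last6 + ch)[-6:]
--     return False
-- ===== Notes on version B (the rewrite author's own statement) =====
-- stated objective: alternative
-- what changed: Replaces A's find-each-'\boxed{'-then-count-braces-with-restart loop by a single left-to-right pass that keeps a stack of per-open-brace flags (flag = the '{' directly follows '\boxed') and returns True as soon as a flagged brace is closed.
import Mathlib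
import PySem

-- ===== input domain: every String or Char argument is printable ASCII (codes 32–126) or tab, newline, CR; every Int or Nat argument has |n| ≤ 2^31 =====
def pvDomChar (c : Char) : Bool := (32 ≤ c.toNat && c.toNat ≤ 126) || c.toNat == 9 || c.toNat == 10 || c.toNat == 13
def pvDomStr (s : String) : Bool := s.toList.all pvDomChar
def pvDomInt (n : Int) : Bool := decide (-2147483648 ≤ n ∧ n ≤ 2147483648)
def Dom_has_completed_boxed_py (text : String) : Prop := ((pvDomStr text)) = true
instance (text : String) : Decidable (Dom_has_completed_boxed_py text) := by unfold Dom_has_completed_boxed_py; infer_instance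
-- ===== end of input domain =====

-- B replaces A's find-each-"\boxed{"-then-count-braces-with-restart strategy by a single
-- left-to-right pass keeping a stack of flags (one per open brace); same return value, O(n).

-- ===== PORT A =====
-- the pattern "\boxed{" and its first 6 characters "\boxed"
def pvBoxed7 : List Char := ['\\', 'b', 'o', 'x', 'e', 'd', '{']
def pvBoxed6 : List Char := ['\\', 'b', 'o', 'x', 'e', 'd']

-- hand port of text.find("\boxed{", start): first p ≥ start where the pattern occurs, else none
-- (exact for this fixed 7-character pattern and a Nat start, which is how A calls find)
def pvFindFrom (cs : List Char) (start : Nat) : Option Nat :=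
  if h : start + 7 ≤ cs.length then
    if (cs.drop start).take 7 = pvBoxed7 then some start
    else pvFindFrom cs (start + 1)
  else none
termination_by cs.length - start
decreasing_by exact Nat.sub_succ_lt_self cs.length start (Nat.lt_of_lt_of_le (Nat.lt_add_of_pos_right (by decide)) h)

-- termination facts for the outer loop (cited by pvAOuter's decreasing_by)
theorem pvFindFrom_bounds (cs : List Char) (start p : Nat)
    (h : pvFindFrom cs start = some p) : start ≤ p ∧ p + 7 ≤ cs.length := by
  revert h
  induction start using pvFindFrom.induct (cs := cs) with
  | case1 x h1 h2 =>
    intro h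
    rw [pvFindFrom, dif_pos h1, if_pos h2] at h
    cases h; omega
  | case2 x h1 h2 ih =>
    intro h
    rw [pvFindFrom, dif_pos h1, if_neg h2] at h
    have := ih h; omega
  | case3 x h1 =>
    intro h
    rw [pvFindFrom, dif_neg h1] at h
    cases h

-- A's inner while loop: state = (remaining text from i, brace); returns the final brace value
def pvAInner : Int → List Char → Int
  | b, [] => b
  | b, c :: t =>
    if b > 0 then pvAInner (if c = '{' then b + 1 else if c = '}' then b - 1 else b) t else b

-- A's outer while-True loop over start
def pvAOuter (cs : List Char) (start : Nat) : Bool :=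
  match hf : pvFindFrom cs start with
  | none => false
  | some p => if pvAInner 1 (cs.drop (p + 7)) = 0 then true else pvAOuter cs (p + 1)
termination_by cs.length - start
decreasing_by exact Nat.lt_of_lt_of_le (Nat.sub_succ_lt_self cs.length p (Nat.lt_of_lt_of_le (Nat.lt_add_of_pos_right (by decide)) (pvFindFrom_bounds cs start p hf).2)) (Nat.sub_le_sub_left (pvFindFrom_bounds cs start p hf).1 cs.length)

def has_completed_boxed_py (text : String) : Bool := pvAOuter text.toList 0

-- ===== PORT B =====
-- last6 = (last6 + ch)[-6:] of Source B
def pvLast6 (l : List Char) : List Char := l.drop (l.length - 6)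

-- the for-loop of Source B: state = (stack, last6); returns True on popping a True flag
def pvBGo : List Bool → List Char → List Char → Bool
  | _, _, [] => false
  | st, l6, c :: t =>
    if c = '{' then pvBGo (decide (l6 = pvBoxed6) :: st) (pvLast6 (l6 ++ [c])) t
    else if c = '}' then
      match st with
      | [] => pvBGo [] (pvLast6 (l6 ++ [c])) t
      | b :: st' => if b then true else pvBGo st' (pvLast6 (l6 ++ [c])) t
    else pvBGo st (pvLast6 (l6 ++ [c])) t

def has_completed_boxed_py_alt (text : String) : Bool := pvBGo [] [] text.toList

-- ===== PRECONDITION & SPEC =====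
def Spec_has_completed_boxed_py (text : String) (out : Bool) : Prop := out = has_completed_boxed_py_alt text
instance (text : String) (out : Bool) : Decidable (Spec_has_completed_boxed_py text out) := by unfold Spec_has_completed_boxed_py; infer_instance

-- ===== CLAIM (what is proved, stated in full; the proofs are below) =====
def Claim_equal_has_completed_boxed_py : Prop := ∀ (text : String), Dom_has_completed_boxed_py text → Spec_has_completed_boxed_py text (has_completed_boxed_py text)

-- ===== LEMMAS AND PROOFS =====

theorem pvAInner_zero (l : List Char) : pvAInner 0 l = 0 := by
  cases l <;> simp [pvAInner]

theorem pvAInner_step (b : Int) (hb : 0 < b) (c : Char) (t : List Char) :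
    pvAInner b (c :: t) = pvAInner (if c = '{' then b + 1 else if c = '}' then b - 1 else b) t := by
  simp [pvAInner, hb]

theorem pvLast6_nil : pvLast6 [] = [] := rfl

-- unfolding equations for pvBGo on a cons head
theorem pvBGo_lbrace (st : List Bool) (l6 t : List Char) :
    pvBGo st l6 ('{' :: t) = pvBGo (decide (l6 = pvBoxed6) :: st) (pvLast6 (l6 ++ ['{'])) t := rfl
theorem pvBGo_rbrace_nil (l6 t : List Char) :
    pvBGo [] l6 ('}' :: t) = pvBGo [] (pvLast6 (l6 ++ ['}'])) t := rfl
theorem pvBGo_rbrace_cons (b : Bool) (st' : List Bool) (l6 t : List Char) :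
    pvBGo (b :: st') l6 ('}' :: t) = if b then true else pvBGo st' (pvLast6 (l6 ++ ['}'])) t := rfl
theorem pvBGo_other (st : List Bool) (l6 : List Char) (c : Char) (t : List Char)
    (h1 : c ≠ '{') (h2 : c ≠ '}') :
    pvBGo st l6 (c :: t) = pvBGo st (pvLast6 (l6 ++ [c])) t := by
  simp [pvBGo, h1, h2]

-- the rolling window update commutes with taking the window first
theorem pvLast6_append (l : List Char) (c : Char) :
    pvLast6 (pvLast6 l ++ [c]) = pvLast6 (l ++ [c]) := by
  by_cases h : l.length ≤ 6
  · have h0 : l.length - 6 = 0 := by omega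
    simp [pvLast6, h0]
  · unfold pvLast6
    have hlen : (l.drop (l.length - 6)).length = 6 := by rw [List.length_drop]; omega
    have h1 : (l.drop (l.length - 6) ++ [c]).length - 6 = 1 := by
      rw [List.length_append, hlen]; rfl
    have h2 : (l ++ [c]).length - 6 = l.length - 5 := by
      rw [List.length_append]; simp
    rw [h1, h2]
    rw [List.drop_append_of_le_length (by rw [hlen]; omega)]
    rw [List.drop_append_of_le_length (by omega)]
    rw [List.drop_drop]
    have h3 : l.length - 6 + 1 = l.length - 5 := by omega
    rw [h3]

-- shifting the "flagged '{' at j" existential across a non-'{' head character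
theorem pvShift_iff (c : Char) (hc : c ≠ '{') (t pre : List Char) :
    (∃ j, j < t.length ∧ t.getD j ' ' = '{' ∧
        pvLast6 ((pre ++ [c]) ++ t.take j) = pvBoxed6 ∧ pvAInner 1 (t.drop (j + 1)) = 0) ↔
    (∃ j, j < (c :: t).length ∧ (c :: t).getD j ' ' = '{' ∧
        pvLast6 (pre ++ (c :: t).take j) = pvBoxed6 ∧ pvAInner 1 ((c :: t).drop (j + 1)) = 0) := by
  constructor
  · rintro ⟨j, h1, h2, h3, h4⟩
    refine ⟨j + 1, by simpa using h1, by simpa using h2, ?_, by simpa using h4⟩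
    rw [List.take_succ_cons, List.append_cons]
    exact h3
  · rintro ⟨j, h1, h2, h3, h4⟩
    match j with
    | 0 => exact absurd h2 (by simpa using hc)
    | j + 1 =>
      refine ⟨j, by simpa using h1, by simpa using h2, ?_, by simpa using h4⟩
      rw [List.take_succ_cons, List.append_cons] at h3
      exact h3

-- characterization of the stack pass
theorem pvBGo_iff (rest : List Char) : ∀ (st : List Bool) (pre : List Char),
    pvBGo st (pvLast6 pre) rest = true ↔
      ((∃ i, i < st.length ∧ st.getD i false = true ∧ pvAInner ((i : Int) + 1) rest = 0) ∨
       (∃ j, j < rest.length ∧ rest.getD j ' ' = '{' ∧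
             pvLast6 (pre ++ rest.take j) = pvBoxed6 ∧ pvAInner 1 (rest.drop (j + 1)) = 0)) := by
  induction rest with
  | nil =>
    intro st pre
    simp only [pvBGo, Bool.false_eq_true, false_iff]
    rintro (⟨i, hi, hst, hz⟩ | ⟨j, hj, -⟩)
    · simp [pvAInner] at hz; omega
    · simp at hj
  | cons c t ih =>
    intro st pre
    by_cases hc1 : c = '{'
    · subst hc1
      rw [pvBGo_lbrace, pvLast6_append, ih]
      constructor
      · rintro (⟨i, hi, hst, hz⟩ | ⟨j, h1, h2, h3, h4⟩)
        · match i with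
          | 0 =>
            have hf : pvLast6 pre = pvBoxed6 := of_decide_eq_true (by simpa using hst)
            refine Or.inr ⟨0, by simp, by simp, by simpa using hf, by simpa using hz⟩
          | i + 1 =>
            refine Or.inl ⟨i, by simpa using hi, by simpa using hst, ?_⟩
            rw [pvAInner_step _ (by omega) _ t, if_pos rfl,
              show ((i : Int) + 1) + 1 = ((i + 1 : Nat) : Int) + 1 by push_cast; ring]
            exact hz
        · refine Or.inr ⟨j + 1, by simpa using h1, by simpa using h2, ?_, by simpa using h4⟩
          rw [List.take_succ_cons, List.append_cons]
          exact h3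
      · rintro (⟨i, hi, hst, hz⟩ | ⟨j, h1, h2, h3, h4⟩)
        · refine Or.inl ⟨i + 1, by simpa using hi, by simpa using hst, ?_⟩
          rw [pvAInner_step _ (by omega) _ t, if_pos rfl,
            show ((i : Int) + 1) + 1 = ((i + 1 : Nat) : Int) + 1 by push_cast; ring] at hz
          exact hz
        · match j with
          | 0 =>
            have hf : pvLast6 pre = pvBoxed6 := by simpa using h3
            refine Or.inl ⟨0, by simp, by simp [hf], by simpa using h4⟩
          | j + 1 =>
            rw [List.take_succ_cons, List.append_cons] at h3
            exact Or.inr ⟨j, by simpa using h1, by simpa using h2, h3, by simpa using h4⟩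
    · by_cases hc2 : c = '}'
      · subst hc2
        match st with
        | [] =>
          rw [pvBGo_rbrace_nil, pvLast6_append, ih]
          constructor
          · rintro (⟨i, hi, -⟩ | hR)
            · simp at hi
            · exact Or.inr ((pvShift_iff '}' (by decide) t pre).mp hR)
          · rintro (⟨i, hi, -⟩ | hR)
            · simp at hi
            · exact Or.inr ((pvShift_iff '}' (by decide) t pre).mpr hR)
        | true :: st' =>
          rw [pvBGo_rbrace_cons, if_pos rfl]
          constructor
          · intro _
            refine Or.inl ⟨0, by simp, by simp, ?_⟩
            rw [show ((0 : Nat) : Int) + 1 = 1 by norm_num,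
              pvAInner_step _ (by omega) _ t]
            simp [pvAInner_zero]
          · intro _; rfl
        | false :: st' =>
          rw [pvBGo_rbrace_cons, if_neg (by simp), pvLast6_append, ih]
          constructor
          · rintro (⟨i, hi, hst, hz⟩ | hR)
            · refine Or.inl ⟨i + 1, by simpa using hi, by simpa using hst, ?_⟩
              rw [pvAInner_step _ (by omega) _ t]
              simp only [if_false, Char.reduceEq, if_true]
              rw [show ((i + 1 : Nat) : Int) + 1 - 1 = (i : Int) + 1 by push_cast; ring]
              exact hz
            · exact Or.inr ((pvShift_iff '}' (by decide) t pre).mp hR)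
          · rintro (⟨i, hi, hst, hz⟩ | hR)
            · match i with
              | 0 => simp at hst
              | i + 1 =>
                refine Or.inl ⟨i, by simpa using hi, by simpa using hst, ?_⟩
                rw [pvAInner_step _ (by omega) _ t] at hz
                simp only [if_false, Char.reduceEq, if_true] at hz
                rw [show ((i + 1 : Nat) : Int) + 1 - 1 = (i : Int) + 1 by push_cast; ring] at hz
                exact hz
            · exact Or.inr ((pvShift_iff '}' (by decide) t pre).mpr hR)
      · rw [pvBGo_other st _ c t hc1 hc2, pvLast6_append, ih]
        constructor
        · rintro (⟨i, hi, hst, hz⟩ | hR)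
          · refine Or.inl ⟨i, hi, hst, ?_⟩
            rw [pvAInner_step _ (by omega) c t, if_neg hc1, if_neg hc2]
            exact hz
          · exact Or.inr ((pvShift_iff c hc1 t pre).mp hR)
        · rintro (⟨i, hi, hst, hz⟩ | hR)
          · refine Or.inl ⟨i, hi, hst, ?_⟩
            rw [pvAInner_step _ (by omega) c t, if_neg hc1, if_neg hc2] at hz
            exact hz
          · exact Or.inr ((pvShift_iff c hc1 t pre).mpr hR)

-- findFrom really is "first occurrence at or after start"
theorem pvFindFrom_none (cs : List Char) (start : Nat) (h : pvFindFrom cs start = none) :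
    ∀ p, start ≤ p → (cs.drop p).take 7 ≠ pvBoxed7 := by
  revert h
  induction start using pvFindFrom.induct (cs := cs) with
  | case1 x h1 h2 =>
    intro h
    rw [pvFindFrom, dif_pos h1, if_pos h2] at h
    cases h
  | case2 x h1 h2 ih =>
    intro h
    rw [pvFindFrom, dif_pos h1, if_neg h2] at h
    intro p hp
    rcases Nat.eq_or_lt_of_le hp with rfl | hlt
    · exact h2
    · exact ih h p hlt
  | case3 x h1 =>
    intro _ p hp hocc
    have hlen7 : ((cs.drop p).take 7).length = 7 := by rw [hocc]; rfl
    rw [List.length_take, List.length_drop] at hlen7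
    omega

theorem pvFindFrom_some (cs : List Char) (start p : Nat) (h : pvFindFrom cs start = some p) :
    (cs.drop p).take 7 = pvBoxed7 ∧
      ∀ q, start ≤ q → q < p → (cs.drop q).take 7 ≠ pvBoxed7 := by
  revert h
  induction start using pvFindFrom.induct (cs := cs) with
  | case1 x h1 h2 =>
    intro h
    rw [pvFindFrom, dif_pos h1, if_pos h2] at h
    cases h
    exact ⟨h2, fun q hq hq' => by omega⟩
  | case2 x h1 h2 ih =>
    intro h
    rw [pvFindFrom, dif_pos h1, if_neg h2] at h
    obtain ⟨ha, hb⟩ := ih h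
    refine ⟨ha, fun q hq hq' => ?_⟩
    rcases Nat.eq_or_lt_of_le hq with rfl | hlt
    · exact h2
    · exact hb q hlt hq'
  | case3 x h1 =>
    intro h
    rw [pvFindFrom, dif_neg h1] at h
    cases h

-- pvAOuter's value by cases on the find result
theorem pvAOuter_none (cs : List Char) (start : Nat) (h : pvFindFrom cs start = none) :
    pvAOuter cs start = false := by
  rw [pvAOuter.eq_def]
  split
  · rfl
  · next p hf => rw [hf] at h; cases h

theorem pvAOuter_some (cs : List Char) (start p : Nat) (h : pvFindFrom cs start = some p) :
    pvAOuter cs start =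
      if pvAInner 1 (cs.drop (p + 7)) = 0 then true else pvAOuter cs (p + 1) := by
  rw [pvAOuter.eq_def]
  split
  · next hf => rw [hf] at h; cases h
  · next q hf => rw [hf] at h; cases h; rfl

-- characterization of A's outer loop
theorem pvAOuter_iff (cs : List Char) (start : Nat) :
    pvAOuter cs start = true ↔
      ∃ p, start ≤ p ∧ (cs.drop p).take 7 = pvBoxed7 ∧ pvAInner 1 (cs.drop (p + 7)) = 0 := by
  suffices h : ∀ (n s : Nat), cs.length - s ≤ n →
      (pvAOuter cs s = true ↔
        ∃ p, s ≤ p ∧ (cs.drop p).take 7 = pvBoxed7 ∧ pvAInner 1 (cs.drop (p + 7)) = 0) from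
    h cs.length start (by omega)
  intro n
  induction n with
  | zero =>
    intro s hs
    have hnone : pvFindFrom cs s = none := by
      rw [pvFindFrom, dif_neg (by omega)]
    rw [pvAOuter_none cs s hnone]
    simp only [Bool.false_eq_true, false_iff]
    rintro ⟨p, hp, hocc, -⟩
    exact pvFindFrom_none cs s hnone p hp hocc
  | succ n ihn =>
    intro s hs
    cases hf : pvFindFrom cs s with
    | none =>
      rw [pvAOuter_none cs s hf]
      simp only [Bool.false_eq_true, false_iff]
      rintro ⟨p, hp, hocc, -⟩
      exact pvFindFrom_none cs s hf p hp hocc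
    | some p =>
      obtain ⟨hsp, hp7⟩ := pvFindFrom_bounds cs s p hf
      obtain ⟨hocc, hmin⟩ := pvFindFrom_some cs s p hf
      rw [pvAOuter_some cs s p hf]
      by_cases hz : pvAInner 1 (cs.drop (p + 7)) = 0
      · rw [if_pos hz]
        simp only [true_iff]
        exact ⟨p, hsp, hocc, hz⟩
      · rw [if_neg hz, ihn (p + 1) (by omega)]
        constructor
        · rintro ⟨q, hq, h1, h2⟩
          exact ⟨q, by omega, h1, h2⟩
        · rintro ⟨q, hq, h1, h2⟩
          refine ⟨q, ?_, h1, h2⟩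
          by_contra hcon
          have hqp : q ≤ p := by omega
          rcases Nat.eq_or_lt_of_le hqp with rfl | hlt
          · exact hz h2
          · exact hmin q hq hlt h1

-- a "\boxed{"-occurrence at p is the same thing as a flagged '{' at j = p + 6
theorem pvFlag_iff_occ (cs : List Char) (j : Nat) :
    (j < cs.length ∧ cs.getD j ' ' = '{' ∧ pvLast6 (cs.take j) = pvBoxed6)
      ↔ (6 ≤ j ∧ (cs.drop (j - 6)).take 7 = pvBoxed7) := by
  constructor
  · rintro ⟨hj, hg, hl⟩
    have hjlen : (cs.take j).length = j := by rw [List.length_take]; omega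
    have hlen6 : (pvLast6 (cs.take j)).length = 6 := by rw [hl]; rfl
    have h6 : 6 ≤ j := by
      unfold pvLast6 at hlen6
      rw [List.length_drop, hjlen] at hlen6
      omega
    refine ⟨h6, ?_⟩
    have h6part : (cs.drop (j - 6)).take 6 = pvBoxed6 := by
      unfold pvLast6 at hl
      rw [hjlen, List.drop_take] at hl
      rw [show j - (j - 6) = 6 by omega] at hl
      exact hl
    have hchar : (cs.drop j).take 1 = ['{'] := by
      cases hd : cs.drop j with
      | nil => rw [List.drop_eq_nil_iff] at hd; omega
      | cons a t =>
        have ha : cs[j]? = some a := by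
          have h0 := @List.getElem?_drop Char cs j 0
          rw [hd] at h0
          simpa using h0.symm
        have : a = '{' := by
          rw [List.getD_eq_getElem?_getD, ha] at hg
          simpa using hg
        simp [this]
    have hx : (cs.drop (j - 6)).drop 6 = cs.drop j := by
      rw [List.drop_drop]
      rw [show j - 6 + 6 = j by omega]
    calc (cs.drop (j - 6)).take 7
        = (cs.drop (j - 6)).take 6 ++ ((cs.drop (j - 6)).drop 6).take 1 := by
          rw [show (7 : Nat) = 6 + 1 from rfl]; exact List.take_add
      _ = pvBoxed6 ++ ['{'] := by rw [h6part, hx, hchar]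
      _ = pvBoxed7 := rfl
  · rintro ⟨h6, hocc⟩
    have hlen7 : ((cs.drop (j - 6)).take 7).length = 7 := by rw [hocc]; rfl
    rw [List.length_take, List.length_drop] at hlen7
    have hjlen : j < cs.length := by omega
    have hx : (cs.drop (j - 6)).drop 6 = cs.drop j := by
      rw [List.drop_drop]
      rw [show j - 6 + 6 = j by omega]
    have hsplit : (cs.drop (j - 6)).take 6 ++ (cs.drop j).take 1 = pvBoxed6 ++ ['{'] := by
      rw [← hx, ← List.take_add]
      exact hocc
    have hlen6' : ((cs.drop (j - 6)).take 6).length = pvBoxed6.length := by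
      rw [List.length_take, List.length_drop, show pvBoxed6.length = 6 from rfl]
      omega
    obtain ⟨h6part, hchar⟩ := List.append_inj hsplit hlen6'
    refine ⟨hjlen, ?_, ?_⟩
    · cases hd : cs.drop j with
      | nil => rw [List.drop_eq_nil_iff] at hd; omega
      | cons a t =>
        rw [hd, List.take_succ_cons, List.take_zero] at hchar
        have ha : cs[j]? = some a := by
          have h0 := @List.getElem?_drop Char cs j 0
          rw [hd] at h0
          simpa using h0.symm
        rw [List.getD_eq_getElem?_getD, ha]
        simpa using hchar
    · unfold pvLast6
      rw [List.length_take, show min j cs.length = j by omega, List.drop_take,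
        show j - (j - 6) = 6 by omega]
      exact h6part

-- ===== VERDICT (by name: the statement is the Claim_ definition above) =====
theorem has_completed_boxed_py_spec : Claim_equal_has_completed_boxed_py := by
  intro text _
  unfold Spec_has_completed_boxed_py has_completed_boxed_py has_completed_boxed_py_alt
  set cs := text.toList
  have hA := pvAOuter_iff cs 0
  have hB := pvBGo_iff cs [] []
  rw [pvLast6_nil] at hB
  simp only [List.nil_append] at hB
  have key : pvAOuter cs 0 = true ↔ pvBGo [] [] cs = true := by
    rw [hA, hB]
    constructor
    · rintro ⟨p, -, hocc, hcl⟩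
      refine Or.inr ⟨p + 6, ?_⟩
      have hp : p + 6 - 6 = p := by omega
      have hfl := (pvFlag_iff_occ cs (p + 6)).mpr ⟨by omega, by rw [hp]; exact hocc⟩
      refine ⟨hfl.1, hfl.2.1, hfl.2.2, ?_⟩
      have h7 : p + 6 + 1 = p + 7 := by omega
      rw [h7]; exact hcl
    · rintro (⟨i, hi, -⟩ | ⟨j, hj1, hj2, hj3, hj4⟩)
      · simp at hi
      · obtain ⟨h6, hocc⟩ := (pvFlag_iff_occ cs j).mp ⟨hj1, hj2, hj3⟩
        refine ⟨j - 6, by omega, hocc, ?_⟩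
        have h7 : j - 6 + 7 = j + 1 := by omega
        rw [h7]; exact hj4
  cases ha : pvAOuter cs 0 <;> cases hb : pvBGo [] [] cs <;> simp_all
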